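-- pv_equiv track=rewrite | github.com/Sinfony8838/QGIS-OpenClaw-Bridge | geobot_runtime/lesson_ppt_local.py | _markdown_to_paragraphs
-- ===== SOURCE A (Python) =====
-- from typing import Any, Dict, Iterable, List
--
-- def _markdown_to_paragraphs(markdown_text: str) -> List[Dict[str, str]]:
--     paragraphs: List[Dict[str, str]] = []
--     for raw_line in markdown_text.splitlines():
--         line = raw_line.rstrip()
--         if not line:
--             paragraphs.append({"style": "Normal", "text": ""})
--             continue
--         if line.startswith("###### "):
--             paragraphs.append({"style": "Heading4", "text": line[7:].strip()})
--         elif line.startswith("##### "):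
--             paragraphs.append({"style": "Heading4", "text": line[6:].strip()})
--         elif line.startswith("#### "):
--             paragraphs.append({"style": "Heading4", "text": line[5:].strip()})
--         elif line.startswith("### "):
--             paragraphs.append({"style": "Heading3", "text": line[4:].strip()})
--         elif line.startswith("## "):
--             paragraphs.append({"style": "Heading2", "text": line[3:].strip()})
--         elif line.startswith("# "):
--             paragraphs.append({"style": "Heading1", "text": line[2:].strip()})
--         elif line.startswith("- "):
--             paragraphs.append({"style": "Normal", "text": "- {}".format(line[2:].strip())})
--         elif line.startswith("  - "):
--             paragraphs.append({"style": "Normal", "text": "  - {}".format(line[4:].strip())})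
--         else:
--             paragraphs.append({"style": "Normal", "text": line})
--     return paragraphs
-- ===== SOURCE B (Python) =====
-- from typing import Dict, List
--
-- _HEADING_STYLES = ("Heading1", "Heading2", "Heading3", "Heading4")
--
--
-- def _markdown_to_paragraphs(markdown_text: str) -> List[Dict[str, str]]:
--     paragraphs: List[Dict[str, str]] = []
--     for raw_line in markdown_text.splitlines():
--         line = raw_line.rstrip()
--         if not line:
--             paragraphs.append({"style": "Normal", "text": ""})
--             continue
--         level = 0
--         while level < len(line) and line[level] == "#":
--             level += 1
--         if 1 <= level <= 6 and level < len(line) and line[level] == " ":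
--             style = _HEADING_STYLES[min(level, 4) - 1]
--             paragraphs.append({"style": style, "text": line[level + 1:].strip()})
--         elif line.startswith("- "):
--             paragraphs.append({"style": "Normal", "text": "- " + line[2:].strip()})
--         elif line.startswith("  - "):
--             paragraphs.append({"style": "Normal", "text": "  - " + line[4:].strip()})
--         else:
--             paragraphs.append({"style": "Normal", "text": line})
--     return paragraphs
-- ===== Notes on version B (the rewrite author's own statement) =====
-- stated objective: simpler
-- what changed: The six literal heading-prefix branches are replaced by one numeric scan that counts leading '#' characters and indexes a style table with min(level,4); the bullet/else handling is unchanged.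
import Mathlib
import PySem

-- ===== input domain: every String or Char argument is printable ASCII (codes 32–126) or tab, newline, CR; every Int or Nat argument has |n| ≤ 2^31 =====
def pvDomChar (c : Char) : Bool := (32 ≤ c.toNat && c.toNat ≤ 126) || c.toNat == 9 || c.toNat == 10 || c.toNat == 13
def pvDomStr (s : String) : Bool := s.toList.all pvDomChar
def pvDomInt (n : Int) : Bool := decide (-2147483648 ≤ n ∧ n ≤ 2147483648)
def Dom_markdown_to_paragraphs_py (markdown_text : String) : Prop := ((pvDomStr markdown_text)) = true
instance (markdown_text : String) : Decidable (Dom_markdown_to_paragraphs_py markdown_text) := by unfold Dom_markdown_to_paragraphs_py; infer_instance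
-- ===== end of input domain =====

-- B replaces A's six literal heading-prefix branches by one scan counting leading '#'
-- plus a style table indexed with min(level,4) (objective: simpler; same per-line cost).


-- ===== PORT A =====
-- per-line body of A's loop, on the rstripped line's code points
-- (line[k:] with a nonnegative literal k is List.drop k — exact on nonnegative bounds)
def pvLineA (cs : List Char) : List (String × String) :=
  if cs = [] then [("style", "Normal"), ("text", "")]
  else if PySem.Chars.startswith cs "###### ".toList then
    [("style", "Heading4"), ("text", String.ofList (PySem.Chars.strip (cs.drop 7)))]
  else if PySem.Chars.startswith cs "##### ".toList then
    [("style", "Heading4"), ("text", String.ofList (PySem.Chars.strip (cs.drop 6)))]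
  else if PySem.Chars.startswith cs "#### ".toList then
    [("style", "Heading4"), ("text", String.ofList (PySem.Chars.strip (cs.drop 5)))]
  else if PySem.Chars.startswith cs "### ".toList then
    [("style", "Heading3"), ("text", String.ofList (PySem.Chars.strip (cs.drop 4)))]
  else if PySem.Chars.startswith cs "## ".toList then
    [("style", "Heading2"), ("text", String.ofList (PySem.Chars.strip (cs.drop 3)))]
  else if PySem.Chars.startswith cs "# ".toList then
    [("style", "Heading1"), ("text", String.ofList (PySem.Chars.strip (cs.drop 2)))]
  else if PySem.Chars.startswith cs "- ".toList then
    [("style", "Normal"), ("text", String.ofList ("- ".toList ++ PySem.Chars.strip (cs.drop 2)))]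
  else if PySem.Chars.startswith cs "  - ".toList then
    [("style", "Normal"), ("text", String.ofList ("  - ".toList ++ PySem.Chars.strip (cs.drop 4)))]
  else
    [("style", "Normal"), ("text", String.ofList cs)]

def markdown_to_paragraphs_py (markdown_text : String) : List (List (String × String)) :=
  (PySem.Str.splitlines markdown_text).foldl
    (fun acc raw_line => acc ++ [pvLineA (PySem.Str.rstrip raw_line).toList]) []

-- ===== PORT B =====
def pvHeadingStyles : List String := ["Heading1", "Heading2", "Heading3", "Heading4"]

-- B's while loop: count leading '#' characters
def pvLevel : List Char → Nat
  | [] => 0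
  | c :: rest => if c = '#' then pvLevel rest + 1 else 0

-- per-line body of B's loop, on the rstripped line's code points
def pvLineB (cs : List Char) : List (String × String) :=
  if cs = [] then [("style", "Normal"), ("text", "")]
  else
    let level := pvLevel cs
    if 1 ≤ level ∧ level ≤ 6 ∧ level < cs.length ∧ cs.getD level '?' = ' ' then
      [("style", pvHeadingStyles.getD (min level 4 - 1) ""),
       ("text", String.ofList (PySem.Chars.strip (cs.drop (level + 1))))]
    else if PySem.Chars.startswith cs "- ".toList then
      [("style", "Normal"), ("text", String.ofList ("- ".toList ++ PySem.Chars.strip (cs.drop 2)))]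
    else if PySem.Chars.startswith cs "  - ".toList then
      [("style", "Normal"), ("text", String.ofList ("  - ".toList ++ PySem.Chars.strip (cs.drop 4)))]
    else
      [("style", "Normal"), ("text", String.ofList cs)]

def markdown_to_paragraphs_py_alt (markdown_text : String) : List (List (String × String)) :=
  (PySem.Str.splitlines markdown_text).foldl
    (fun acc raw_line => acc ++ [pvLineB (PySem.Str.rstrip raw_line).toList]) []

-- ===== PRECONDITION & SPEC =====
def Spec_markdown_to_paragraphs_py (markdown_text : String) (out : List (List (String × String))) : Prop := out = markdown_to_paragraphs_py_alt markdown_text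
instance (markdown_text : String) (out : List (List (String × String))) : Decidable (Spec_markdown_to_paragraphs_py markdown_text out) := by unfold Spec_markdown_to_paragraphs_py; infer_instance

-- ===== CLAIM (what is proved, stated in full; the proofs are below) =====
def Claim_equal_markdown_to_paragraphs_py : Prop := ∀ (markdown_text : String), Dom_markdown_to_paragraphs_py markdown_text → Spec_markdown_to_paragraphs_py markdown_text (markdown_to_paragraphs_py markdown_text)

-- ===== LEMMAS AND PROOFS =====

-- a heading prefix of m hashes matches iff the hash count is exactly m and a space follows
theorem pvPrefHash_iff (m : Nat) (cs : List Char) :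
    PySem.Chars.startswith cs (List.replicate m '#' ++ [' ']) = true ↔
      (pvLevel cs = m ∧ cs[m]? = some ' ') := by
  rw [PySem.Chars.startswith_iff]
  induction m generalizing cs with
  | zero =>
    cases cs with
    | nil => simp [pvLevel]
    | cons c t =>
      simp [pvLevel, List.replicate]
      constructor
      · rintro rfl; exact ⟨by decide, rfl⟩
      · rintro ⟨-, rfl⟩; rfl
  | succ m ih =>
    cases cs with
    | nil => simp
    | cons c t =>
      rw [List.replicate_succ]
      simp only [List.cons_append, List.cons_prefix_cons, pvLevel, List.getElem?_cons_succ]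
      constructor
      · rintro ⟨rfl, hp⟩
        rcases (ih t).mp hp with ⟨h1, h2⟩
        simp [h1, h2]
      · rintro ⟨h1, h2⟩
        by_cases hc : c = '#'
        · subst hc
          rw [if_pos rfl] at h1
          exact ⟨rfl, (ih t).mpr ⟨Nat.succ_injective h1, h2⟩⟩
        · simp [hc] at h1

theorem pvStartswith_hash (m : Nat) (cs : List Char) :
    PySem.Chars.startswith cs (List.replicate m '#' ++ [' ']) =
      decide (pvLevel cs = m ∧ cs[m]? = some ' ') := by
  rw [Bool.eq_iff_iff, decide_eq_true_eq]
  exact pvPrefHash_iff m cs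

theorem pvLine_eq (cs : List Char) : pvLineA cs = pvLineB cs := by
  by_cases hnil : cs = []
  · simp [pvLineA, pvLineB, hnil]
  · unfold pvLineA pvLineB
    rw [if_neg hnil, if_neg hnil]
    have p6 : ("###### ".toList : List Char) = List.replicate 6 '#' ++ [' '] := by decide
    have p5 : ("##### ".toList : List Char) = List.replicate 5 '#' ++ [' '] := by decide
    have p4 : ("#### ".toList : List Char) = List.replicate 4 '#' ++ [' '] := by decide
    have p3 : ("### ".toList : List Char) = List.replicate 3 '#' ++ [' '] := by decide
    have p2 : ("## ".toList : List Char) = List.replicate 2 '#' ++ [' '] := by decide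
    have p1 : ("# ".toList : List Char) = List.replicate 1 '#' ++ [' '] := by decide
    rw [p6, p5, p4, p3, p2, p1,
        pvStartswith_hash 6 cs, pvStartswith_hash 5 cs, pvStartswith_hash 4 cs,
        pvStartswith_hash 3 cs, pvStartswith_hash 2 cs, pvStartswith_hash 1 cs]
    show _ = (if 1 ≤ pvLevel cs ∧ pvLevel cs ≤ 6 ∧ pvLevel cs < cs.length ∧
        cs.getD (pvLevel cs) '?' = ' ' then
      [("style", pvHeadingStyles.getD (min (pvLevel cs) 4 - 1) ""),
       ("text", String.ofList (PySem.Chars.strip (cs.drop (pvLevel cs + 1))))]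
    else if PySem.Chars.startswith cs "- ".toList then
      [("style", "Normal"), ("text", String.ofList ("- ".toList ++ PySem.Chars.strip (cs.drop 2)))]
    else if PySem.Chars.startswith cs "  - ".toList then
      [("style", "Normal"), ("text", String.ofList ("  - ".toList ++ PySem.Chars.strip (cs.drop 4)))]
    else
      [("style", "Normal"), ("text", String.ofList cs)])
    by_cases hc : 1 ≤ pvLevel cs ∧ pvLevel cs ≤ 6 ∧ pvLevel cs < cs.length ∧
        cs.getD (pvLevel cs) '?' = ' '
    · obtain ⟨h1, h6, hlen, hsp⟩ := hc
      have hcc : cs[pvLevel cs] = ' ' := (List.getD_eq_getElem cs '?' hlen).symm.trans hsp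
      have hget : cs[pvLevel cs]? = some ' ' := by
        rw [List.getElem?_eq_getElem hlen, hcc]
      obtain ⟨k, hk⟩ : ∃ k, pvLevel cs = k := ⟨pvLevel cs, rfl⟩
      rw [hk] at hget hsp hlen h1 h6 ⊢
      interval_cases k <;> simp [hget, hlen, hsp, pvHeadingStyles]
    · rw [if_neg hc]
      have hfalse : ∀ m, 1 ≤ m → m ≤ 6 →
          (decide (pvLevel cs = m ∧ cs[m]? = some ' ')) = false := by
        intro m hm1 hm6
        rw [decide_eq_false_iff_not]
        rintro ⟨hlev, hget⟩
        apply hc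
        have hlt : m < cs.length := (List.getElem?_eq_some_iff.mp hget).1
        have hval : cs[m] = ' ' := (List.getElem?_eq_some_iff.mp hget).2
        refine ⟨by omega, by omega, by rw [hlev]; exact hlt, ?_⟩
        rw [hlev, List.getD_eq_getElem cs '?' hlt]
        exact hval
      rw [hfalse 6 (by omega) (by omega), hfalse 5 (by omega) (by omega),
          hfalse 4 (by omega) (by omega), hfalse 3 (by omega) (by omega),
          hfalse 2 (by omega) (by omega), hfalse 1 (by omega) (by omega)]
      simp

-- ===== VERDICT (by name: the statement is the Claim_ definition above) =====
theorem markdown_to_paragraphs_py_spec : Claim_equal_markdown_to_paragraphs_py := by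
  intro markdown_text _
  unfold Spec_markdown_to_paragraphs_py markdown_to_paragraphs_py markdown_to_paragraphs_py_alt
  rw [PySem.List.foldl_append_singleton_eq_map, PySem.List.foldl_append_singleton_eq_map]
  simp only [List.nil_append]
  exact List.map_congr_left (fun raw _ => pvLine_eq _)
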